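-- pv_equiv track=rewrite | github.com/ChahelPaatur/Self-Modifying-Program-Synthesis-via-Online-Library-Evolution | models/canonicalizer/solver.py | merge_color_maps
-- ===== SOURCE A (Python) =====
-- from typing import List, Dict, Tuple, Optional, Set
--
-- def merge_color_maps(maps: List[Dict[int, int]]) -> Optional[Dict[int, int]]:
--     """Merge multiple color maps; return None if conflicts"""
--     merged = {}
--     for m in maps:
--         for k, v in m.items():
--             if k in merged:
--                 if merged[k] != v:
--                     return None
--             merged[k] = v
--     return merged
-- ===== SOURCE B (Python) =====
-- def merge_color_maps(maps):
--     """Merge multiple color maps; return None if conflicts"""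
--     # Pass 1: group every value seen for each key, no conflict checking.
--     groups = {}
--     for m in maps:
--         for k, v in m.items():
--             groups.setdefault(k, []).append(v)
--     # Pass 2: validate each group, then build the merged map from representatives.
--     if any(any(v != vs[0] for v in vs) for vs in groups.values()):
--         return None
--     return {k: vs[0] for k, vs in groups.items()}
-- ===== Notes on version B (the rewrite author's own statement) =====
-- stated objective: alternative
-- what changed: A merges in a single pass with an inline conflict check and early return; B first groups all values per key with no checking, then validates each group and builds the merged dict from one representative per group.
import Mathlib
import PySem

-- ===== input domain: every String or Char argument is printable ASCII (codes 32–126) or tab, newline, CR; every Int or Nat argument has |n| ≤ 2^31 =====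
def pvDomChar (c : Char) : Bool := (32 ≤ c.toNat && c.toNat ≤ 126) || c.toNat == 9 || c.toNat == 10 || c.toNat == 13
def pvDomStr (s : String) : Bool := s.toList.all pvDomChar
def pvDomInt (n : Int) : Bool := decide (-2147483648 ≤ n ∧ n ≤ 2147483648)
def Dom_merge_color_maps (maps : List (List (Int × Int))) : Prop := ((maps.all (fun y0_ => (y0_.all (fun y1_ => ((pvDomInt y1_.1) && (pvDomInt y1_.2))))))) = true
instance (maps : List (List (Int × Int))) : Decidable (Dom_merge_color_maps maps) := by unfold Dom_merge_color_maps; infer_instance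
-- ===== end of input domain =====

-- B replaces A's single merge-with-early-return pass by a group-then-validate two-pass scheme (alternative decomposition, same cost).

-- ===== PORT A =====
-- the inner 'for k, v in m.items()' loop; merged[k] is getD (k is present when read)
def mergeItemsA : List (Int × Int) → PySem.Dict Int Int → Option (PySem.Dict Int Int)
  | [], merged => some merged
  | (k, v) :: rest, merged =>
    if merged.contains k then
      if merged.getD k 0 ≠ v then none
      else mergeItemsA rest (merged.insert k v)
    else mergeItemsA rest (merged.insert k v)

-- the outer 'for m in maps' loop; an early 'return None' aborts the whole loop
def mergeMapsA : List (List (Int × Int)) → PySem.Dict Int Int → Option (PySem.Dict Int Int)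
  | [], merged => some merged
  | m :: rest, merged =>
    match mergeItemsA (PySem.Dict.ofList m).items merged with
    | none => none
    | some merged' => mergeMapsA rest merged'

def merge_color_maps (maps : List (List (Int × Int))) : Option (List (Int × Int)) :=
  (mergeMapsA maps PySem.Dict.empty).map (fun d => d.items)

-- ===== PORT B =====
-- pass 1: groups.setdefault(k, []).append(v)  =  modify k [] (· ++ [v])
def groupsB (maps : List (List (Int × Int))) : PySem.Dict Int (List Int) :=
  maps.foldl
    (fun g m => (PySem.Dict.ofList m).items.foldl (fun g p => g.modify p.1 [] (fun vs => vs ++ [p.2])) g)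
    PySem.Dict.empty
-- pass 2: validation and comprehension; vs[0] is headD 0 (every group is nonempty, built by append)
def merge_color_maps_alt (maps : List (List (Int × Int))) : Option (List (Int × Int)) :=
  let groups := groupsB maps
  if groups.items.any (fun p => p.2.any (fun v => !(v == p.2.headD 0))) then none
  else some (groups.items.map (fun p => (p.1, p.2.headD 0)))

-- ===== PRECONDITION & SPEC =====
def Spec_merge_color_maps (maps : List (List (Int × Int))) (out : Option (List (Int × Int))) : Prop := out = merge_color_maps_alt maps
instance (maps : List (List (Int × Int))) (out : Option (List (Int × Int))) : Decidable (Spec_merge_color_maps maps out) := by unfold Spec_merge_color_maps; infer_instance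

-- ===== CLAIM (what is proved, stated in full; the proofs are below) =====
def Claim_equal_merge_color_maps : Prop := ∀ (maps : List (List (Int × Int))), Dom_merge_color_maps maps → Spec_merge_color_maps maps (merge_color_maps maps)

-- ===== LEMMAS AND PROOFS =====

-- the flattened item stream both programs actually traverse
def pvFlat (maps : List (List (Int × Int))) : List (Int × Int) :=
  maps.flatMap (fun m => (PySem.Dict.ofList m).items)

def pvFinish (g : PySem.Dict Int (List Int)) : Option (List (Int × Int)) :=
  if g.items.any (fun p => p.2.any (fun v => !(v == p.2.headD 0))) then none
  else some (g.items.map (fun p => (p.1, p.2.headD 0)))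

theorem mergeItemsA_append (xs ys : List (Int × Int)) (d : PySem.Dict Int Int) :
    mergeItemsA (xs ++ ys) d = (mergeItemsA xs d).bind (mergeItemsA ys) := by
  induction xs generalizing d with
  | nil => rfl
  | cons p rest ih =>
    obtain ⟨k, v⟩ := p
    simp only [List.cons_append, mergeItemsA]
    split_ifs with h1 h2
    · rfl
    · exact ih _
    · exact ih _

theorem mergeMapsA_eq_flat (maps : List (List (Int × Int))) (d : PySem.Dict Int Int) :
    mergeMapsA maps d = mergeItemsA (pvFlat maps) d := by
  induction maps generalizing d with
  | nil => rfl
  | cons m rest ih =>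
    simp only [mergeMapsA, pvFlat, List.flatMap_cons, mergeItemsA_append]
    cases mergeItemsA (PySem.Dict.ofList m).items d with
    | none => rfl
    | some d' => simpa [pvFlat] using ih d'

theorem groupsB_eq_flat (maps : List (List (Int × Int))) :
    groupsB maps = (pvFlat maps).foldl (fun g p => g.modify p.1 [] (fun vs => vs ++ [p.2])) PySem.Dict.empty := by
  unfold groupsB pvFlat
  generalize PySem.Dict.empty = g0
  induction maps generalizing g0 with
  | nil => rfl
  | cons m rest ih =>
    simp only [List.foldl_cons, List.flatMap_cons, List.foldl_append, ih]

theorem merge_main (L : List (Int × Int)) (d : PySem.Dict Int Int) (g : PySem.Dict Int (List Int))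
    (hnd : g.keys.Nodup)
    (hitems : d.items = g.items.map (fun p => (p.1, p.2.headD 0)))
    (hne : ∀ p ∈ g.items, p.2 ≠ [])
    (hok : ∀ p ∈ g.items, p.2.all (fun v => v == p.2.headD 0)) :
    (mergeItemsA L d).map (fun d => d.items)
      = pvFinish (L.foldl (fun g p => g.modify p.1 [] (fun vs => vs ++ [p.2])) g) := by
  induction L generalizing d g with
  | nil =>
    have hfalse : g.items.any (fun p => p.2.any (fun v => !(v == p.2.headD 0))) = false := by
      rw [List.any_eq_false]
      intro p hp
      simp only [Bool.not_eq_true]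
      rw [List.any_eq_false]
      intro v hv
      have := hok p hp
      rw [List.all_eq_true] at this
      have h2 := this v hv
      simp only [Bool.not_eq_true]
      simpa using h2
    simp only [mergeItemsA, List.foldl_nil, Option.map_some, pvFinish, hfalse]
    simp [hitems]
  | cons q L' ih =>
    obtain ⟨k, v⟩ := q
    have hkeys : d.keys = g.keys := by
      simp only [PySem.Dict.keys, hitems, List.map_map]
      rfl
    have hdnd : d.keys.Nodup := hkeys ▸ hnd
    have hcont : d.contains k = g.contains k := by
      rw [PySem.Dict.contains_eq_decide_mem_keys, PySem.Dict.contains_eq_decide_mem_keys, hkeys]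
    have hmod : ∀ (g : PySem.Dict Int (List Int)) (k v : Int),
        g.modify k [] (fun vs => vs ++ [v]) = g.insert k (g.getD k [] ++ [v]) := fun _ _ _ => rfl
    simp only [mergeItemsA, List.foldl_cons]
    cases hcg : g.contains k with
    | true =>
      -- the key is already present: fetch its (nonempty) group a :: tl
      have hsome : (g.get? k).isSome := by
        rw [← PySem.Dict.contains_eq_isSome_get?]; exact hcg
      obtain ⟨vs, hvs⟩ := Option.isSome_iff_exists.mp hsome
      have hvs_mem : (k, vs) ∈ g.items := PySem.Dict.mem_items_of_get?_eq_some g hvs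
      have hvsne : vs ≠ [] := hne _ hvs_mem
      obtain ⟨a, tl, rfl⟩ := List.exists_cons_of_ne_nil hvsne
      have hvsok : ∀ x ∈ a :: tl, x = a := by simpa using hok _ hvs_mem
      have hdmem : (k, a) ∈ d.items := by
        rw [hitems]
        exact List.mem_map.mpr ⟨(k, a :: tl), hvs_mem, rfl⟩
      have hdget : d.getD k 0 = a := PySem.Dict.getD_of_mem_items d hdmem hdnd 0
      have hgget : g.getD k [] = a :: tl := PySem.Dict.getD_of_get?_eq_some g [] hvs
      rw [if_pos (by rw [hcont]; exact hcg), hmod, hgget]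
      by_cases hv : a = v
      · rw [if_neg (by rw [hdget]; simpa using hv)]
        apply ih
        · exact PySem.Dict.nodup_keys_insert _ _ _ hnd
        · rw [PySem.Dict.items_insert_of_contains _ _ (by rw [hcont]; exact hcg),
              PySem.Dict.items_insert_of_contains _ _ hcg, hitems, List.map_map, List.map_map]
          apply List.map_congr_left
          intro p _
          by_cases hp : p.1 = k
          · simp [Function.comp, hp, hv]
          · simp [Function.comp, hp]
        · intro p hp
          rw [PySem.Dict.mem_items_insert] at hp
          rcases hp with rfl | ⟨hp, _⟩
          · simp
          · exact hne _ hp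
        · intro p hp
          rw [PySem.Dict.mem_items_insert] at hp
          rcases hp with rfl | ⟨hp, _⟩
          · rw [List.all_eq_true]
            intro x hx
            simp only [List.cons_append, List.headD_cons, beq_iff_eq]
            simp only [List.cons_append, List.mem_cons, List.mem_append] at hx
            rcases hx with rfl | hx | rfl | h
            · rfl
            · exact hvsok x (List.mem_cons_of_mem _ hx)
            · exact hv.symm
            · cases h
          · exact hok _ hp
      · rw [if_pos (by rw [hdget]; simpa using hv)]
        -- A aborts; show B's final grouping still records the conflict at k
        set step : PySem.Dict Int (List Int) → Int × Int → PySem.Dict Int (List Int) :=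
          fun g p => g.modify p.1 [] (fun vs => vs ++ [p.2]) with hstep
        set gi := g.insert k ((a :: tl) ++ [v]) with hgi
        set g'' := L'.foldl step gi with hg''
        have hgik : gi.getD k [] = (a :: tl) ++ [v] := PySem.Dict.getD_insert_self g k ((a :: tl) ++ [v]) []
        have hval : g''.getD k [] = ((a :: tl) ++ [v]) ++ (L'.filter (fun p => p.1 == k)).map (fun p => p.2) := by
          rw [hg'', hstep, PySem.Dict.getD_foldl_modify_append, hgik]
        have hcontk : g''.contains k = true := by
          by_contra hcf
          have : g''.getD k [] = [] := PySem.Dict.getD_of_not_contains g'' []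
            (by simpa using hcf)
          rw [hval] at this
          simp at this
        have hg''some : (g''.get? k).isSome := by
          rw [← PySem.Dict.contains_eq_isSome_get?]; exact hcontk
        obtain ⟨w, hw⟩ := Option.isSome_iff_exists.mp hg''some
        have hwval : w = ((a :: tl) ++ [v]) ++ (L'.filter (fun p => p.1 == k)).map (fun p => p.2) := by
          rw [← hval]
          exact (PySem.Dict.getD_of_get?_eq_some g'' [] hw).symm
        have hwmem : (k, w) ∈ g''.items := PySem.Dict.mem_items_of_get?_eq_some g'' hw
        have hwhead : w.headD 0 = a := by rw [hwval]; rfl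
        have hvw : v ∈ w := by rw [hwval]; simp
        have hcondtrue : g''.items.any (fun p => p.2.any (fun v => !(v == p.2.headD 0))) = true := by
          rw [List.any_eq_true]
          refine ⟨(k, w), hwmem, ?_⟩
          rw [List.any_eq_true]
          refine ⟨v, hvw, ?_⟩
          rw [hwhead]
          simpa using fun h => hv h.symm
        simp only [Option.map_none]
        unfold pvFinish
        rw [if_pos hcondtrue]
    | false =>
      rw [if_neg (by rw [hcont, hcg]; simp), hmod,
          PySem.Dict.getD_of_not_contains g [] hcg]
      apply ih
      · exact PySem.Dict.nodup_keys_insert _ _ _ hnd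
      · rw [PySem.Dict.items_insert_of_not_contains _ _ (by rw [hcont]; exact hcg),
            PySem.Dict.items_insert_of_not_contains _ _ hcg, hitems]
        simp
      · intro p hp
        rw [PySem.Dict.mem_items_insert] at hp
        rcases hp with rfl | ⟨hp, _⟩
        · simp
        · exact hne _ hp
      · intro p hp
        rw [PySem.Dict.mem_items_insert] at hp
        rcases hp with rfl | ⟨hp, _⟩
        · simp
        · exact hok _ hp

-- ===== VERDICT (by name: the statement is the Claim_ definition above) =====
theorem merge_color_maps_spec : Claim_equal_merge_color_maps := by
  intro maps _
  unfold Spec_merge_color_maps merge_color_maps merge_color_maps_alt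
  rw [mergeMapsA_eq_flat, groupsB_eq_flat]
  exact merge_main (pvFlat maps) PySem.Dict.empty PySem.Dict.empty (by simp [PySem.Dict.keys_empty]) rfl (by intro p h; cases h) (by intro p h; cases h)
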